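-- pv_equiv track=rewrite | github.com/miliar/Code_Jam_Webscraper | solutions_python/solutions_year17_round0_nr3/1935.py | go_into_next_stall
-- ===== SOURCE A (Python) =====
-- from itertools import groupby
-- import math
--
-- FREE = False
--
-- OCCUPIED = True
--
-- def go_into_next_stall(stalls):
--     final_index = 0
--
--     grouped = groupby(stalls)
--     max_len = 0
--     for key, group in groupby(stalls):
--         if key == FREE:
--             max_len = max(max_len, len(list(group)))
--
--     for key, group in grouped:
--         group = list(group)
--         group_len = len(group)
--         if key == OCCUPIED or group_len != max_len:
--             final_index += group_len
--         else:
--             final_index += int((group_len - 1) / 2)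
--             l_val, r_val = math.ceil((group_len - 1) / 2), math.floor((group_len - 1) / 2)
--             break
--
--     stalls[final_index] = OCCUPIED
--     return l_val, r_val
-- ===== SOURCE B (Python) =====
-- FREE = False
--
-- OCCUPIED = True
--
-- def go_into_next_stall(stalls):
--     # Like the original, mutates stalls in place (marks the chosen stall occupied).
--     runs = []
--     start = None
--     for i, s in enumerate(stalls):
--         if s == FREE:
--             if start is None:
--                 start = i
--         else:
--             if start is not None:
--                 runs.append((start, i - start))
--                 start = None
--     if start is not None:
--         runs.append((start, len(stalls) - start))
--     best_start, best_len = max(runs, key=lambda r: r[1])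
--     stalls[best_start + (best_len - 1) // 2] = OCCUPIED
--     return best_len // 2, (best_len - 1) // 2
-- ===== Notes on version B (the rewrite author's own statement) =====
-- stated objective: faster
-- what changed: Replaced the two itertools.groupby passes (one for max length, one re-walked with a break to locate the group) by a single indexed scan that tabulates every free run as a (start, length) pair and then picks the first longest entry with max(key=len).
import Mathlib
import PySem

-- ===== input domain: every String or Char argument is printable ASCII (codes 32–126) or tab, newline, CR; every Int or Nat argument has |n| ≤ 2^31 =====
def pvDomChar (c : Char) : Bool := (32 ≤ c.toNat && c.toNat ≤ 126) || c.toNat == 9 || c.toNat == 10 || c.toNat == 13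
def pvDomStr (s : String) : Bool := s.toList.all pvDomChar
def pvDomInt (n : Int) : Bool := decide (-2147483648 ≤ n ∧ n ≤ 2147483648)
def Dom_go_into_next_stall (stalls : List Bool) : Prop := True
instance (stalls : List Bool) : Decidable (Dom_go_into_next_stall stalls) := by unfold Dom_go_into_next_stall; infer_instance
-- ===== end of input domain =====

-- B replaces A's two groupby passes and break-scan by one indexed scan that tabulates each
-- free run as (start, length) and then picks the first longest entry (objective: alternative).
-- Both A and B mutate `stalls` in place at the same index; the equivalence proved here is
-- about the RETURN value (the pair) only.

-- ===== PORT A =====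
-- itertools.groupby rendered as the list of (key, run length) pairs, left to right
def groupsOf : List Bool → List (Bool × Nat)
  | [] => []
  | x :: xs =>
    match groupsOf xs with
    | (k, n) :: gs => if k = x then (x, n + 1) :: gs else (x, 1) :: (k, n) :: gs
    | [] => [(x, 1)]

-- first loop: max_len over FREE groups
def maxFreeLen (gs : List (Bool × Nat)) : Nat :=
  gs.foldl (fun m g => if g.1 = false then max m g.2 else m) 0

-- second loop with its break; idx tracks final_index (used only for the mutation, not the
-- returned pair).  math.ceil((n-1)/2) = n/2 and math.floor((n-1)/2) = (n-1)/2 in Nat,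
-- exact since every group length n ≥ 1.  `none` = the loop never breaks: Python then
-- raises (IndexError on stalls[final_index]) — excluded by Pre_.
def scanA : List (Bool × Nat) → Int → Nat → Option (Int × Int)
  | [], _, _ => none
  | (k, n) :: gs, idx, m =>
    if k = true ∨ n ≠ m then scanA gs (idx + (n : Int)) m
    else some (((n / 2 : Nat) : Int), (((n - 1) / 2 : Nat) : Int))

def go_into_next_stall (stalls : List Bool) : Int × Int :=
  (scanA (groupsOf stalls) 0 (maxFreeLen (groupsOf stalls))).getD (0, 0)

-- ===== PORT B =====
-- Source B's single for-loop over enumerate(stalls): state = (current index i, open-run start,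
-- runs table); the trailing open run is closed with len(stalls) - start (= i - start here).
def loopB : List Bool → Int → Option Int → List (Int × Int) → List (Int × Int)
  | [], i, start?, runs =>
    match start? with
    | none => runs
    | some st => runs ++ [(st, i - st)]
  | s :: rest, i, start?, runs =>
    if s = false then
      loopB rest (i + 1) (some (start?.getD i)) runs
    else
      match start? with
      | none => loopB rest (i + 1) none runs
      | some st => loopB rest (i + 1) none (runs ++ [(st, i - st)])

-- max(runs, key=λ r: r[1]): first entry with the greatest length; none on empty
-- (Source B's max raises ValueError there — excluded by Pre_)
def pickBest (rs : List (Int × Int)) : Option (Int × Int) :=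
  match rs with
  | [] => none
  | r :: tl => some (tl.foldl (fun b r' => if r'.2 > b.2 then r' else b) r)

def go_into_next_stall_alt (stalls : List Bool) : Int × Int :=
  match pickBest (loopB stalls 0 none []) with
  | some (_, bestLen) => (PySem.Int.floordiv bestLen 2, PySem.Int.floordiv (bestLen - 1) 2)
  | none => (0, 0)

-- ===== PRECONDITION & SPEC =====
-- Pre_ excludes exactly the inputs with no FREE stall: there A raises IndexError
-- (stalls[len(stalls)] = OCCUPIED) and B raises ValueError (max of an empty sequence).
def Pre_go_into_next_stall (stalls : List Bool) : Prop := false ∈ stalls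
instance (stalls : List Bool) : Decidable (Pre_go_into_next_stall stalls) := by unfold Pre_go_into_next_stall; infer_instance

def pvWitness_go_into_next_stall : List Bool := [true, false, false, true]

def Spec_go_into_next_stall (stalls : List Bool) (out : Int × Int) : Prop := out = go_into_next_stall_alt stalls
instance (stalls : List Bool) (out : Int × Int) : Decidable (Spec_go_into_next_stall stalls out) := by unfold Spec_go_into_next_stall; infer_instance

-- ===== CLAIM (what is proved, stated in full; the proofs are below) =====
def Claim_equal_go_into_next_stall : Prop := ∀ (stalls : List Bool), Dom_go_into_next_stall stalls → Pre_go_into_next_stall stalls → Spec_go_into_next_stall stalls (go_into_next_stall stalls)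

-- ===== LEMMAS AND PROOFS =====

-- lengths (as Int) of the FREE groups, in order
def intFl (gs : List (Bool × Nat)) : List Int :=
  (gs.filter (fun g => g.1 = false)).map (fun g => (g.2 : Int))

-- intFl with a pending open free run of length p merged into the first group if it is free
def pend (p : Int) : List (Bool × Nat) → List Int
  | (false, n) :: tl => (p + (n : Int)) :: intFl tl
  | gs => p :: intFl gs

def opend (start? : Option Int) (i : Int) (gs : List (Bool × Nat)) : List Int :=
  match start? with
  | none => intFl gs
  | some st => pend (i - st) gs

-- recursive form of maxFreeLen
def maxF : List (Bool × Nat) → Nat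
  | [] => 0
  | (k, n) :: gs => if k = false then max n (maxF gs) else maxF gs

theorem maxFreeLen_foldl (gs : List (Bool × Nat)) : ∀ (a : Nat),
    gs.foldl (fun m g => if g.1 = false then max m g.2 else m) a = max a (maxF gs) := by
  induction gs with
  | nil => intro a; simp [maxF]
  | cons g gs ih =>
    intro a
    obtain ⟨k, n⟩ := g
    cases k <;> simp [List.foldl, maxF, ih]

theorem maxFreeLen_eq (gs : List (Bool × Nat)) : maxFreeLen gs = maxF gs := by
  simp [maxFreeLen, maxFreeLen_foldl]

theorem groupsOf_len_pos (xs : List Bool) : ∀ g ∈ groupsOf xs, 1 ≤ g.2 := by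
  induction xs with
  | nil => simp [groupsOf]
  | cons x xs ih =>
    intro g hg
    cases h : groupsOf xs with
    | nil =>
      simp [groupsOf, h] at hg; subst hg; simp
    | cons g0 gs =>
      obtain ⟨k, n⟩ := g0
      by_cases hk : k = x
      · simp [groupsOf, h, hk] at hg
        rcases hg with hg | hg
        · subst hg; simp
        · exact ih g (by simp [h, hg])
      · simp [groupsOf, h, hk] at hg
        rcases hg with hg | hg | hg
        · subst hg; simp
        · subst hg; exact ih (k, n) (by simp [h])
        · exact ih g (by simp [h, hg])

theorem intFl_pos (xs : List Bool) : ∀ v ∈ intFl (groupsOf xs), 1 ≤ v := by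
  intro v hv
  unfold intFl at hv
  rw [List.mem_map] at hv
  obtain ⟨g, hg, hvv⟩ := hv
  have := groupsOf_len_pos xs g (List.mem_of_mem_filter hg)
  omega

theorem intFl_groupsOf_true (tl : List Bool) :
    intFl (groupsOf (true :: tl)) = intFl (groupsOf tl) := by
  cases h : groupsOf tl with
  | nil => simp [groupsOf, h, intFl]
  | cons g gs =>
    obtain ⟨k, n⟩ := g
    cases k <;> simp [groupsOf, h, intFl]

theorem maxF_pos (xs : List Bool) (hx : false ∈ xs) : 1 ≤ maxF (groupsOf xs) := by
  induction xs with
  | nil => simp at hx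
  | cons x xs ih =>
    cases x
    · cases h : groupsOf xs with
      | nil => simp [groupsOf, h, maxF]
      | cons g gs =>
        obtain ⟨k, n⟩ := g
        cases k <;> simp [groupsOf, h, maxF]
    · have hx' : false ∈ xs := by simpa using hx
      have := ih hx'
      cases h : groupsOf xs with
      | nil => rw [h] at this; simp [maxF] at this
      | cons g gs =>
        obtain ⟨k, n⟩ := g
        rw [h] at this
        cases k <;> simp [groupsOf, h, maxF] at this ⊢ <;> omega

theorem loopB_snd (rest : List Bool) : ∀ (i : Int) (start? : Option Int) (runs : List (Int × Int)),
    (loopB rest i start? runs).map Prod.snd = runs.map Prod.snd ++ opend start? i (groupsOf rest) := by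
  induction rest with
  | nil =>
    intro i start? runs
    cases start? <;> simp [loopB, opend, groupsOf, intFl, pend]
  | cons s tl ih =>
    intro i start? runs
    cases s
    · -- s = false
      have hstep : loopB (false :: tl) i start? runs = loopB tl (i + 1) (some (start?.getD i)) runs := by
        simp [loopB]
      rw [hstep, ih]
      congr 1
      cases start? with
      | none =>
        cases h : groupsOf tl with
        | nil => simp [opend, groupsOf, h, pend, intFl]
        | cons g gs =>
          obtain ⟨k, n⟩ := g
          cases k
          · simp [opend, groupsOf, h, pend, intFl]
            omega
          · simp [opend, groupsOf, h, pend, intFl]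
      | some st =>
        cases h : groupsOf tl with
        | nil =>
          simp [opend, groupsOf, h, pend, intFl]
          omega
        | cons g gs =>
          obtain ⟨k, n⟩ := g
          cases k
          · simp [opend, groupsOf, h, pend, intFl]
            omega
          · simp [opend, groupsOf, h, pend, intFl]
            omega
    · -- s = true
      cases start? with
      | none =>
        have hstep : loopB (true :: tl) i none runs = loopB tl (i + 1) none runs := by
          simp [loopB]
        rw [hstep, ih]
        simp [opend, intFl_groupsOf_true]
      | some st =>
        have hstep : loopB (true :: tl) i (some st) runs
            = loopB tl (i + 1) none (runs ++ [(st, i - st)]) := by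
          simp [loopB]
        rw [hstep, ih]
        cases h : groupsOf tl with
        | nil => simp [opend, groupsOf, h, pend, intFl]
        | cons g gs =>
          obtain ⟨k, n⟩ := g
          cases k <;> simp [opend, groupsOf, h, pend, intFl]

theorem pickBest_snd (tl : List (Int × Int)) : ∀ (b : Int × Int),
    (tl.foldl (fun b r' => if r'.2 > b.2 then r' else b) b).2
      = tl.foldl (fun m r' => max m r'.2) b.2 := by
  induction tl with
  | nil => intro b; simp
  | cons r tl ih =>
    intro b
    simp only [List.foldl]
    rw [ih]
    congr 1
    split <;> omega

theorem scanA_eq (gs : List (Bool × Nat)) : ∀ (idx : Int) (m : Nat), maxF gs = m → 1 ≤ m →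
    scanA gs idx m = some (((m / 2 : Nat) : Int), (((m - 1) / 2 : Nat) : Int)) := by
  induction gs with
  | nil => intro idx m hm h1; simp [maxF] at hm; omega
  | cons g gs ih =>
    intro idx m hm h1
    obtain ⟨k, n⟩ := g
    by_cases hc : k = true ∨ n ≠ m
    · have hrec : maxF gs = m := by
        cases k
        · simp [maxF] at hm
          rcases hc with hc | hc
          · simp at hc
          · omega
        · simpa [maxF] using hm
      have hstep : scanA ((k, n) :: gs) idx m = scanA gs (idx + (n : Int)) m := by
        simp [scanA, hc]
      rw [hstep]
      exact ih _ m hrec h1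
    · rw [not_or] at hc
      obtain ⟨hk, hn⟩ := hc
      simp at hk hn
      subst hk
      subst hn
      simp [scanA]

theorem intFl_foldl (gs : List (Bool × Nat)) : ∀ (a : Nat),
    (intFl gs).foldl max ((a : Nat) : Int) = ((gs.foldl (fun m g => if g.1 = false then max m g.2 else m) a : Nat) : Int) := by
  induction gs with
  | nil => intro a; simp [intFl]
  | cons g gs ih =>
    intro a
    obtain ⟨k, n⟩ := g
    cases k
    · simpa [intFl, List.foldl, Nat.cast_max] using ih (max a n)
    · simpa [intFl, List.foldl] using ih a

-- ===== VERDICT (by name: the statement is the Claim_ definition above) =====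
theorem go_into_next_stall_spec : Claim_equal_go_into_next_stall := by
  intro stalls _ hpre
  unfold Spec_go_into_next_stall
  have hpre' : false ∈ stalls := hpre
  set G := groupsOf stalls with hG
  set m := maxF G with hm
  have hm1 : 1 ≤ m := maxF_pos stalls hpre'
  -- A side
  have hA : go_into_next_stall stalls = (((m / 2 : Nat) : Int), (((m - 1) / 2 : Nat) : Int)) := by
    unfold go_into_next_stall
    rw [maxFreeLen_eq, ← hG, ← hm, scanA_eq G 0 m rfl hm1]
    rfl
  -- B side
  have hsnd : (loopB stalls 0 none []).map Prod.snd = intFl G := by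
    simpa [opend] using loopB_snd stalls 0 none []
  have hfold : (intFl G).foldl max (0 : Int) = ((maxF G : Nat) : Int) := by
    have := intFl_foldl G 0
    rw [maxFreeLen_foldl] at this
    simpa using this
  cases hr : loopB stalls 0 none [] with
  | nil =>
    exfalso
    rw [hr] at hsnd
    rw [← hsnd] at hfold
    simp at hfold
    omega
  | cons r tl =>
    rw [hr] at hsnd
    have hhead : 1 ≤ r.2 := by
      apply intFl_pos stalls
      rw [← hG, ← hsnd]
      simp
    have hbest : (tl.foldl (fun b r' => if r'.2 > b.2 then r' else b) r).2 = ((m : Nat) : Int) := by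
      rw [pickBest_snd]
      have h1 : tl.foldl (fun a r' => max a r'.2) r.2 = (tl.map Prod.snd).foldl max r.2 := by
        rw [List.foldl_map]
      have h2 : (intFl G).foldl max (0 : Int) = (tl.map Prod.snd).foldl max r.2 := by
        rw [← hsnd]
        simp only [List.map_cons, List.foldl_cons]
        congr 1
        omega
      rw [h1, ← h2, hfold, ← hm]
    unfold go_into_next_stall_alt
    rw [hr]
    simp only [pickBest]
    rw [hA]
    have hb2 := hbest
    -- reduce the match on pickBest's some
    cases hb : tl.foldl (fun b r' => if r'.2 > b.2 then r' else b) r with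
    | mk bs bl =>
      rw [hb] at hb2
      simp at hb2
      subst hb2
      have e1 : PySem.Int.floordiv ((m : Nat) : Int) 2 = ((m / 2 : Nat) : Int) := by
        exact_mod_cast PySem.Int.floordiv_natCast m 2
      have ec : ((m : Nat) : Int) - 1 = ((m - 1 : Nat) : Int) := by omega
      have e2 : PySem.Int.floordiv (((m : Nat) : Int) - 1) 2 = (((m - 1) / 2 : Nat) : Int) := by
        rw [ec]
        exact_mod_cast PySem.Int.floordiv_natCast (m - 1) 2
      rw [e1, e2]
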